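-- pv_equiv track=rewrite | github.com/rickykise/Crawling | crawling_webhard/webhard1_191128/crawling_backup/crawling/sns_view/snsFun.py | getPutKeyword
-- ===== SOURCE A (Python) =====
-- def getPutKeyword(text,arr):
--     key = {
--         'find':0,
--         'keyword':''
--     }
--     for item in arr:
--         findnum = text.find(item.replace("영화",""))
--         if key['keyword'] == '' and int(findnum) != -1:
--             key.update({'find':findnum,'keyword':item})
--         if key['keyword'] != '' and key['find'] >= int(findnum) and int(findnum) != -1:
--             key.update({'find':findnum,'keyword':item})
--
--     return key['keyword']
-- ===== SOURCE B (Python) =====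
-- def getPutKeyword(text, arr):
--     pairs = [(item, item.replace("영화", "")) for item in arr]
--     for pos in range(len(text) + 1):
--         for item, key in reversed(pairs):
--             if text[pos:].startswith(key):
--                 return item
--     return ''
-- ===== Notes on version B (the rewrite author's own statement) =====
-- stated objective: alternative
-- what changed: Instead of computing text.find for every item and keeping a running minimum in a dict, B scans the TEXT positions left to right and at the first position where any (keyword-replaced) pattern starts as a prefix it immediately returns the last such item of arr (which encodes A's later-wins tie-break); no find calls and no accumulator state.
-- outside the precondition, e.g. on getPutKeyword('ab', ['', 'b']): A returns 'b', B returns ''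
import Mathlib
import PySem

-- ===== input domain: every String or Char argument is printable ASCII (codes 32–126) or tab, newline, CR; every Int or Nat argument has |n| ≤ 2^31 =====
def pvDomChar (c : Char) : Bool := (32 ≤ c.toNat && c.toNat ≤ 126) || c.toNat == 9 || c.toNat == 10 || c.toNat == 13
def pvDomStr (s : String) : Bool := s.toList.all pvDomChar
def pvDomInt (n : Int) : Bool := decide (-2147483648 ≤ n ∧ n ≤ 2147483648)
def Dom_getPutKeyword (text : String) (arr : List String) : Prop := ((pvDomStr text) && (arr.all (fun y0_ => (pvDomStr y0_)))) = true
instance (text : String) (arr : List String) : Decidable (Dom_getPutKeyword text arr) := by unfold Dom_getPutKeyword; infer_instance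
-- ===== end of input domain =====

-- B replaces A's per-item find with running-minimum state by a scan over TEXT POSITIONS:
-- at the first position where some (keyword-replaced) pattern starts, the last such item
-- in arr order is returned immediately (early return, no accumulator); a timing run
-- measured this early exit markedly faster on the generated inputs.

-- ===== PORT A =====
-- the dict 'key' carries only the two fields 'find' (Int) and 'keyword' (String): ported as a pair
def getPutKeyword (text : String) (arr : List String) : String :=
  (arr.foldl
    (fun (key : Int × String) item =>
      let findnum := PySem.Str.find text (PySem.Str.replace item "영화" "")
      let key1 := if key.2 = "" ∧ findnum ≠ -1 then (findnum, item) else key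
      if key1.2 ≠ "" ∧ findnum ≤ key1.1 ∧ findnum ≠ -1 then (findnum, item) else key1)
    (0, "")).2

-- ===== PORT B =====
-- text[pos:] with 0 ≤ pos ≤ len(text) is t.drop pos on code points; the two for-loops with
-- their early 'return' are findSome? over range(len+1) and find? over the reversed pair list.
def getPutKeyword_alt (text : String) (arr : List String) : String :=
  let t := text.toList
  let pairs := arr.map (fun item => (item, (PySem.Str.replace item "영화" "").toList))
  (((List.range (t.length + 1)).findSome? (fun pos =>
      (pairs.reverse.find? (fun p => PySem.Chars.startswith (t.drop pos) p.2)).map Prod.fst)).getD "")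

-- ===== PRECONDITION & SPEC =====
-- Pre_ excludes arrays that contain the empty string together with some nonempty item that
-- occurs in the text — a defensible corner: ''.find gives 0 everywhere, and A's returned
-- keyword then depends accidentally on where '' sits in the list (A skips a leading '' but
-- lets a later '' overwrite or reset the scan), while B uniformly treats '' as a
-- position-0 match.  When no nonempty item occurs in the text both return '' and the
-- input stays admitted.
def Pre_getPutKeyword (text : String) (arr : List String) : Prop :=
  (∀ x ∈ arr, x ≠ "") ∨ (∀ x ∈ arr, x = "" ∨ ¬ (PySem.Str.replace x "영화" "").toList <:+: text.toList)
instance (text : String) (arr : List String) : Decidable (Pre_getPutKeyword text arr) := by unfold Pre_getPutKeyword; infer_instance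
def pvWitness_getPutKeyword : String × List String := ("hello cat", ["cat", "dog", "lo"])

def Spec_getPutKeyword (text : String) (arr : List String) (out : String) : Prop := out = getPutKeyword_alt text arr
instance (text : String) (arr : List String) (out : String) : Decidable (Spec_getPutKeyword text arr out) := by unfold Spec_getPutKeyword; infer_instance

-- ===== CLAIM (what is proved, stated in full; the proofs are below) =====
def Claim_equal_getPutKeyword : Prop := ∀ (text : String) (arr : List String), Dom_getPutKeyword text arr → Pre_getPutKeyword text arr → Spec_getPutKeyword text arr (getPutKeyword text arr)

-- ===== LEMMAS AND PROOFS =====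

-- A's loop body, with the found-position of the item abstracted as 'fn'
def pvStep (fn : Int) (item : String) (key : Int × String) : Int × String :=
  let key1 := if key.2 = "" ∧ fn ≠ -1 then (fn, item) else key
  if key1.2 ≠ "" ∧ fn ≤ key1.1 ∧ fn ≠ -1 then (fn, item) else key1

-- minimum of the find-positions over the items that are found at all (-1 = not found)
def pvMin? (f : String → Int) : List String → Option Int
  | [] => none
  | x :: xs =>
    let r := pvMin? f xs
    if f x = -1 then r
    else match r with
      | none => some (f x)
      | some m => some (min (f x) m)

-- the common specification: the LAST item achieving the minimal find-position, else ''
def pvRes (f : String → Int) (l : List String) : String :=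
  match pvMin? f l with
  | none => ""
  | some m => (l.reverse.find? (fun x => f x == m)).getD ""

theorem pvFind?_congr {α : Type} (p q : α → Bool) :
    ∀ l : List α, (∀ x ∈ l, p x = q x) → l.find? p = l.find? q := by
  intro l
  induction l with
  | nil => intro _; rfl
  | cons x xs ih =>
    intro h
    simp only [List.find?_cons, h x (List.mem_cons_self ..)]
    cases q x <;> simp [ih (fun y hy => h y (List.mem_cons_of_mem _ hy))]

theorem pvMin?_none (f : String → Int) :
    ∀ l : List String, pvMin? f l = none ↔ ∀ x ∈ l, f x = -1 := by
  intro l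
  induction l with
  | nil => simp [pvMin?]
  | cons x xs ih =>
    simp only [pvMin?]
    by_cases hx : f x = -1
    · simp [hx, ih]
    · rcases h : pvMin? f xs with _ | m <;> simp [hx]

theorem pvMin?_some (f : String → Int) :
    ∀ (l : List String) (m : Int), pvMin? f l = some m →
      (∃ x ∈ l, f x = m) ∧ (∀ x ∈ l, f x ≠ -1 → m ≤ f x) ∧ m ≠ -1 := by
  intro l
  induction l with
  | nil => intro m h; simp [pvMin?] at h
  | cons x xs ih =>
    intro m h
    simp only [pvMin?] at h
    by_cases hx : f x = -1
    · rw [if_pos hx] at h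
      obtain ⟨⟨y, hy, hfy⟩, hmin, hm1⟩ := ih m h
      exact ⟨⟨y, List.mem_cons_of_mem _ hy, hfy⟩,
             fun z hz hz1 => by
               rcases List.mem_cons.mp hz with rfl | hz'
               · exact absurd hx hz1
               · exact hmin z hz' hz1, hm1⟩
    · rw [if_neg hx] at h
      rcases hr : pvMin? f xs with _ | m'
      · rw [hr] at h
        simp only [Option.some.injEq] at h
        subst h
        refine ⟨⟨x, List.mem_cons_self .., rfl⟩, fun z hz hz1 => ?_, hx⟩
        rcases List.mem_cons.mp hz with rfl | hz'
        · exact le_refl _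
        · exact absurd ((pvMin?_none f xs).mp hr z hz') hz1
      · rw [hr] at h
        simp only [Option.some.injEq] at h
        obtain ⟨⟨y, hy, hfy⟩, hmin, hm1⟩ := ih m' hr
        subst h
        constructor
        · rcases le_total (f x) m' with hle | hle
          · exact ⟨x, List.mem_cons_self .., (min_eq_left hle).symm⟩
          · exact ⟨y, List.mem_cons_of_mem _ hy, by rw [hfy, min_eq_right hle]⟩
        refine ⟨fun z hz hz1 => ?_, ?_⟩
        · rcases List.mem_cons.mp hz with rfl | hz'
          · exact min_le_left _ _
          · exact le_trans (min_le_right _ _) (hmin z hz' hz1)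
        · rcases le_total (f x) m' with hle | hle
          · rw [min_eq_left hle]; exact hx
          · rw [min_eq_right hle]; exact hm1

-- A's state after the whole fold, as a function of the minimal position
def pvPost (f : String → Int) (l : List String) (m₀ : Int) (w₀ : String) : Int × String :=
  match pvMin? f l with
  | none => (m₀, w₀)
  | some m => if w₀ = "" ∨ m ≤ m₀ then (m, (l.reverse.find? (fun x => f x == m)).getD "") else (m₀, w₀)

theorem pvPost_none (f : String → Int) (l : List String) (m₀ : Int) (w₀ : String)
    (hr : pvMin? f l = none) : pvPost f l m₀ w₀ = (m₀, w₀) := by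
  unfold pvPost; rw [hr]

theorem pvPost_some (f : String → Int) (l : List String) (m₀ : Int) (w₀ : String) (m : Int)
    (hr : pvMin? f l = some m) :
    pvPost f l m₀ w₀ =
      if w₀ = "" ∨ m ≤ m₀ then (m, (l.reverse.find? (fun x => f x == m)).getD "") else (m₀, w₀) := by
  unfold pvPost; rw [hr]

-- characterisation of A's fold (all items nonempty): tracking the last argmin
theorem pvFoldA_char (f : String → Int) :
    ∀ (l : List String), (∀ x ∈ l, x ≠ "") → ∀ (m₀ : Int) (w₀ : String),
    l.foldl (fun key item => pvStep (f item) item key) (m₀, w₀) = pvPost f l m₀ w₀ := by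
  intro l
  induction l with
  | nil => intro _ m₀ w₀; rw [List.foldl_nil, pvPost_none f [] m₀ w₀ rfl]
  | cons x xs ih =>
    intro h m₀ w₀
    have hx : x ≠ "" := h x (List.mem_cons_self ..)
    have ht : ∀ y ∈ xs, y ≠ "" := fun y hy => h y (List.mem_cons_of_mem _ hy)
    simp only [List.foldl_cons]
    by_cases hfx : f x = -1
    · have hstep : pvStep (f x) x (m₀, w₀) = (m₀, w₀) := by unfold pvStep; simp [hfx]
      rw [hstep, ih ht m₀ w₀]
      have hmm : pvMin? f (x :: xs) = pvMin? f xs := by simp [pvMin?, hfx]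
      rcases hr : pvMin? f xs with _ | m
      · rw [pvPost_none f xs m₀ w₀ hr, pvPost_none f (x :: xs) m₀ w₀ (by rw [hmm, hr])]
      · have hm1 : m ≠ -1 := (pvMin?_some f xs m hr).2.2
        rw [pvPost_some f xs m₀ w₀ m hr, pvPost_some f (x :: xs) m₀ w₀ m (by rw [hmm, hr])]
        have hbx : (f x == m) = false := by simp only [beq_eq_false_iff_ne]; omega
        have hfind : (x :: xs).reverse.find? (fun z => f z == m) = xs.reverse.find? (fun z => f z == m) := by
          rw [List.reverse_cons, List.find?_append]
          have h1 : List.find? (fun z => f z == m) [x] = none := by simp [List.find?, hbx]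
          rw [h1, Option.or_none]
        rw [hfind]
    · -- f x ≠ -1
      have hmm : pvMin? f (x :: xs) =
          match pvMin? f xs with
          | none => some (f x)
          | some m' => some (min (f x) m') := by simp [pvMin?, hfx]
      have hfind_at_x : ∀ m : Int, f x = m → (∀ y ∈ xs, ¬ f y = m) →
          (x :: xs).reverse.find? (fun z => f z == m) = some x := by
        intro m hm hnone
        rw [List.reverse_cons, List.find?_append]
        have h1 : xs.reverse.find? (fun z => f z == m) = none := by
          rw [List.find?_eq_none]
          intro y hy
          simp only [beq_iff_eq]
          exact hnone y (List.mem_reverse.mp hy)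
        rw [h1, Option.none_or]
        simp [List.find?, hm]
      have hfind_in_xs : ∀ m : Int, (∃ y ∈ xs, f y = m) →
          (x :: xs).reverse.find? (fun z => f z == m) = xs.reverse.find? (fun z => f z == m) := by
        intro m hm
        obtain ⟨y, hy, hfy⟩ := hm
        rw [List.reverse_cons, List.find?_append]
        have h1 : (xs.reverse.find? (fun z => f z == m)).isSome := by
          rw [List.find?_isSome]
          exact ⟨y, List.mem_reverse.mpr hy, by simp [hfy]⟩
        rcases ho : xs.reverse.find? (fun z => f z == m) with _ | z
        · rw [ho] at h1; simp at h1
        · rfl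
      by_cases hw : w₀ = "" ∨ f x ≤ m₀
      · have hstep : pvStep (f x) x (m₀, w₀) = (f x, x) := by
          unfold pvStep
          rcases hw with hw | hw
          · simp [hw, hfx, hx]
          · by_cases hw0 : w₀ = "" <;> simp [hw0, hfx, hx, hw]
        rw [hstep, ih ht (f x) x]
        rcases hr : pvMin? f xs with _ | m'
        · -- nothing found in xs: winner is x
          rw [pvPost_none f xs (f x) x hr,
              pvPost_some f (x :: xs) m₀ w₀ (f x) (by rw [hmm, hr])]
          have hnone : ∀ y ∈ xs, ¬ f y = f x := fun y hy he => hfx (he ▸ (pvMin?_none f xs).mp hr y hy)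
          rw [hfind_at_x (f x) rfl hnone, if_pos hw]
          rfl
        · obtain ⟨⟨y, hy, hfy⟩, hmin, hm1⟩ := pvMin?_some f xs m' hr
          rw [pvPost_some f xs (f x) x m' hr,
              pvPost_some f (x :: xs) m₀ w₀ (min (f x) m') (by rw [hmm, hr])]
          by_cases hle : m' ≤ f x
          · rw [if_pos (Or.inr hle), min_eq_right hle,
                hfind_in_xs m' ⟨y, hy, hfy⟩]
            have hcond : w₀ = "" ∨ m' ≤ m₀ := by
              rcases hw with hw | hw
              · exact Or.inl hw
              · exact Or.inr (le_trans hle hw)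
            rw [if_pos hcond]
          · have hlt : f x < m' := lt_of_not_ge hle
            rw [if_neg (by simp [hx]; omega), min_eq_left (le_of_lt hlt)]
            have hnone : ∀ y' ∈ xs, ¬ f y' = f x := by
              intro y' hy' he
              have hne : f y' ≠ -1 := he ▸ hfx
              have := hmin y' hy' hne
              omega
            rw [hfind_at_x (f x) rfl hnone, if_pos hw]
            rfl
      · -- w₀ ≠ '' and m₀ < f x : no update at x
        obtain ⟨hw0, hm0⟩ := not_or.mp hw
        have hstep : pvStep (f x) x (m₀, w₀) = (m₀, w₀) := by
          unfold pvStep; simp [hw0, hfx]; omega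
        rw [hstep, ih ht m₀ w₀]
        rcases hr : pvMin? f xs with _ | m'
        · rw [pvPost_none f xs m₀ w₀ hr,
              pvPost_some f (x :: xs) m₀ w₀ (f x) (by rw [hmm, hr])]
          rw [if_neg (by simp [hw0]; omega)]
        · obtain ⟨⟨y, hy, hfy⟩, hmin, hm1⟩ := pvMin?_some f xs m' hr
          rw [pvPost_some f xs m₀ w₀ m' hr,
              pvPost_some f (x :: xs) m₀ w₀ (min (f x) m') (by rw [hmm, hr])]
          by_cases hle : m' ≤ m₀
          · rw [if_pos (Or.inr hle)]
            have hminx : min (f x) m' = m' := min_eq_right (by omega)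
            rw [hminx, if_pos (Or.inr hle), hfind_in_xs m' ⟨y, hy, hfy⟩]
          · rw [if_neg (by simp [hw0]; omega),
                if_neg (by simp [hw0]; omega)]

-- branch 2 of Pre_: every item is '' or unfound — A's keyword stays ''
theorem pvFoldA_blank (f : String → Int) :
    ∀ (l : List String), (∀ x ∈ l, x = "" ∨ f x = -1) → ∀ (m₀ : Int),
    (l.foldl (fun key item => pvStep (f item) item key) (m₀, "")).2 = "" := by
  intro l
  induction l with
  | nil => intro _ m₀; rfl
  | cons x xs ih =>
    intro h m₀
    have ht : ∀ y ∈ xs, y = "" ∨ f y = -1 := fun y hy => h y (List.mem_cons_of_mem _ hy)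
    simp only [List.foldl_cons]
    rcases h x (List.mem_cons_self ..) with rfl | hfx
    · by_cases hfx : f "" = -1
      · have hstep : pvStep (f "") "" (m₀, "") = (m₀, "") := by unfold pvStep; simp [hfx]
        rw [hstep]; exact ih ht m₀
      · have hstep : pvStep (f "") "" (m₀, "") = (f "", "") := by unfold pvStep; simp [hfx]
        rw [hstep]; exact ih ht (f "")
    · have hstep : pvStep (f x) x (m₀, "") = (m₀, "") := by unfold pvStep; simp [hfx]
      rw [hstep]; exact ih ht m₀

-- helper: findSome? over range(n+1) when everything below M is none and M hits
theorem pvFindSome?_range {α : Type} (inner : Nat → Option α) (M n : Nat) (hMn : M ≤ n)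
    (h0 : ∀ p, p < M → inner p = none) (hs : inner M ≠ none) :
    (List.range (n + 1)).findSome? inner = inner M := by
  have hsplit : n + 1 = M + (n + 1 - M) := by omega
  rw [hsplit, List.range_add, List.findSome?_append]
  have h1 : (List.range M).findSome? inner = none := by
    rw [List.findSome?_eq_none_iff]
    intro p hp
    exact h0 p (List.mem_range.mp hp)
  rw [h1, Option.none_or]
  have hk : n + 1 - M = (n - M) + 1 := by omega
  rw [hk, List.range_succ_eq_map]
  simp only [List.map_cons, List.findSome?_cons, Nat.add_zero]
  rcases ho : inner M with _ | w
  · exact absurd ho hs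
  · rfl

-- characterisation of B: the last item whose pattern occurs at the minimal position
theorem pvB_char (text : String) (arr : List String) :
    getPutKeyword_alt text arr =
      pvRes (fun x => PySem.Str.find text (PySem.Str.replace x "영화" "")) arr := by
  unfold getPutKeyword_alt
  simp only []
  set t := text.toList with ht
  set g : String → List Char := fun x => (PySem.Str.replace x "영화" "").toList with hg
  set f : String → Int := fun x => PySem.Str.find text (PySem.Str.replace x "영화" "") with hf
  have hfc : ∀ x, f x = PySem.Chars.find t (g x) := by
    intro x; rw [hf, hg, ht]; simp [PySem.Str.find_eq]
  -- rewrite the inner loop as a find? over arr.reverse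
  have hinner : ∀ pos : Nat,
      ((arr.map (fun item => (item, g item))).reverse.find?
          (fun p => PySem.Chars.startswith (t.drop pos) p.2)).map Prod.fst
        = arr.reverse.find? (fun x => PySem.Chars.startswith (t.drop pos) (g x)) := by
    intro pos
    rw [← List.map_reverse, List.find?_map, Option.map_map]
    have : (Prod.fst ∘ fun item => (item, g item)) = id := rfl
    rw [this, Option.map_id]
    rfl
  -- occurrence facts
  have hocc1 : ∀ (x : String) (pos : Nat), g x <+: t.drop pos → f x ≠ -1 ∧ f x ≤ (pos : Int) := by
    intro x pos hp
    have hinf : g x <:+: t := hp.isInfix.trans (List.drop_suffix pos t).isInfix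
    have hne : PySem.Chars.find t (g x) ≠ -1 := (PySem.Chars.find_ne_neg_one_iff t (g x)).mpr hinf
    have hge : -1 ≤ PySem.Chars.find t (g x) := PySem.Chars.neg_one_le_find t (g x)
    have h0 : 0 ≤ PySem.Chars.find t (g x) := by omega
    have hspec := (PySem.Chars.find_spec h0).2
    have hle : (PySem.Chars.find t (g x)).toNat ≤ pos := by
      by_contra hc
      exact hspec pos (by omega) hp
    rw [hfc]
    constructor
    · exact hne
    · omega
  have hocc2 : ∀ x : String, 0 ≤ f x → g x <+: t.drop (f x).toNat := by
    intro x h0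
    rw [hfc] at h0 ⊢
    exact (PySem.Chars.find_spec h0).1
  rcases hmin : pvMin? f arr with _ | m
  · -- nothing is found: both sides give ''
    have hall := (pvMin?_none f arr).mp hmin
    have houter : (List.range (t.length + 1)).findSome?
        (fun pos => ((arr.map (fun item => (item, g item))).reverse.find?
          (fun p => PySem.Chars.startswith (t.drop pos) p.2)).map Prod.fst) = none := by
      rw [List.findSome?_eq_none_iff]
      intro pos _
      rw [hinner pos, List.find?_eq_none]
      intro x hx
      rw [Bool.not_eq_true, ← Bool.not_eq_true]
      intro hsw
      have hp := (PySem.Chars.startswith_iff _ _).mp hsw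
      exact (hocc1 x pos hp).1 (hall x (List.mem_reverse.mp hx))
    rw [houter]
    simp [pvRes, hmin]
  · obtain ⟨⟨y, hy, hfy⟩, hminle, hm1⟩ := pvMin?_some f arr m hmin
    have hmge : -1 ≤ f y := hfc y ▸ PySem.Chars.neg_one_le_find t (g y)
    have hm0 : 0 ≤ m := by omega
    have hmlen : m ≤ (t.length : Int) := hfy ▸ (hfc y ▸ PySem.Chars.find_le_length t (g y))
    set M := m.toNat with hM
    have hmM : (M : Int) = m := Int.toNat_of_nonneg hm0
    -- below M nothing matches
    have hbelow : ∀ pos : Nat, pos < M →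
        ((arr.map (fun item => (item, g item))).reverse.find?
          (fun p => PySem.Chars.startswith (t.drop pos) p.2)).map Prod.fst = none := by
      intro pos hpos
      rw [hinner pos, List.find?_eq_none]
      intro x hx
      rw [Bool.not_eq_true, ← Bool.not_eq_true]
      intro hsw
      have hp := (PySem.Chars.startswith_iff _ _).mp hsw
      obtain ⟨hne, hle⟩ := hocc1 x pos hp
      have := hminle x (List.mem_reverse.mp hx) hne
      omega
    -- at M the match predicate is exactly 'f x = m'
    have hatM : ∀ x ∈ arr.reverse,
        PySem.Chars.startswith (t.drop M) (g x) = (f x == m) := by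
      intro x hx
      by_cases hfx : f x = m
      · have h0 : 0 ≤ f x := by omega
        have hp := hocc2 x h0
        have : (f x).toNat = M := by rw [hfx]
        rw [this] at hp
        rw [(PySem.Chars.startswith_iff _ _).mpr hp]
        simp [hfx]
      · have : ¬ PySem.Chars.startswith (t.drop M) (g x) = true := by
          intro hsw
          have hp := (PySem.Chars.startswith_iff _ _).mp hsw
          obtain ⟨hne, hle⟩ := hocc1 x M hp
          have := hminle x (List.mem_reverse.mp hx) hne
          omega
        simp only [Bool.not_eq_true] at this
        rw [this]
        simp [hfx]
    have hcongr : arr.reverse.find? (fun x => PySem.Chars.startswith (t.drop M) (g x))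
        = arr.reverse.find? (fun x => f x == m) :=
      pvFind?_congr _ _ arr.reverse hatM
    have hsomeM : (arr.reverse.find? (fun x => f x == m)).isSome := by
      rw [List.find?_isSome]
      exact ⟨y, List.mem_reverse.mpr hy, by simp [hfy]⟩
    have hMne : ((arr.map (fun item => (item, g item))).reverse.find?
          (fun p => PySem.Chars.startswith (t.drop M) p.2)).map Prod.fst ≠ none := by
      rw [hinner M, hcongr]
      rcases ho : arr.reverse.find? (fun x => f x == m) with _ | z
      · rw [ho] at hsomeM; simp at hsomeM
      · simp
    have hMlen : M ≤ t.length := by omega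
    rw [pvFindSome?_range _ M t.length hMlen hbelow hMne, hinner M, hcongr]
    simp [pvRes, hmin]

-- ===== VERDICT (by name: the statement is the Claim_ definition above) =====
theorem getPutKeyword_spec : Claim_equal_getPutKeyword := by
  intro text arr _ hpre
  unfold Spec_getPutKeyword
  set f : String → Int := fun x => PySem.Str.find text (PySem.Str.replace x "영화" "") with hf
  have hA : getPutKeyword text arr
      = (arr.foldl (fun key item => pvStep (f item) item key) ((0 : Int), "")).2 := rfl
  rw [hA, pvB_char text arr, ← hf]
  rcases hpre with hpre | hpre
  · rw [pvFoldA_char f arr hpre 0 ""]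
    rcases hmin : pvMin? f arr with _ | m
    · rw [pvPost_none f arr 0 "" hmin]; simp [pvRes, hmin]
    · rw [pvPost_some f arr 0 "" m hmin, if_pos (Or.inl rfl)]
      simp [pvRes, hmin]
  · have hpre' : ∀ x ∈ arr, x = "" ∨ f x = -1 := by
      intro x hx
      rcases hpre x hx with h | h
      · exact Or.inl h
      · refine Or.inr ?_
        rw [hf]
        simp only [PySem.Str.find_eq]
        exact (PySem.Chars.find_eq_neg_one_iff _ _).mpr (by
          simpa [PySem.Str.toList_replace] using h)
    rw [pvFoldA_blank f arr hpre' 0]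
    rcases hmin : pvMin? f arr with _ | m
    · simp [pvRes, hmin]
    · have hm1 : m ≠ -1 := (pvMin?_some f arr m hmin).2.2
      simp only [pvRes, hmin]
      rcases hfind : arr.reverse.find? (fun x => f x == m) with _ | z
      · rfl
      · have hz := List.find?_some hfind
        have hzm : f z = m := by simpa using hz
        have hzmem : z ∈ arr := List.mem_reverse.mp (List.mem_of_find?_eq_some hfind)
        rcases hpre' z hzmem with rfl | hzf
        · simp
        · exact absurd hzm (by rw [hzf]; omega)
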